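-- pv_equiv track=rewrite | github.com/jto5108/cmpsc472-project1 | mapreduce_sort.py | chunk_indices
-- ===== SOURCE A (Python) =====
-- def chunk_indices(total_len, n_chunks):
--     """Divide total_len into n_chunks as evenly as possible"""
--     base = total_len // n_chunks
--     remainder = total_len % n_chunks
--     indices = []
--     start = 0
--     for i in range(n_chunks):
--         end = start + base + (1 if i < remainder else 0)  # distribute remainder
--         indices.append((start, end))
--         start = end
--     return indices
-- ===== SOURCE B (Python) =====
-- def chunk_indices(total_len, n_chunks):
--     """Divide total_len into n_chunks as evenly as possible"""
--     base, remainder = divmod(total_len, n_chunks)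
--     return [(i * base + min(i, remainder), (i + 1) * base + min(i + 1, remainder))
--             for i in range(n_chunks)]
-- ===== Notes on version B (the rewrite author's own statement) =====
-- stated objective: simpler
-- what changed: Replaces the loop threading a running start accumulator with a stateless comprehension computing each chunk's bounds in closed form from its index (start_i = i*base + min(i, remainder)).
import Mathlib
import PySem

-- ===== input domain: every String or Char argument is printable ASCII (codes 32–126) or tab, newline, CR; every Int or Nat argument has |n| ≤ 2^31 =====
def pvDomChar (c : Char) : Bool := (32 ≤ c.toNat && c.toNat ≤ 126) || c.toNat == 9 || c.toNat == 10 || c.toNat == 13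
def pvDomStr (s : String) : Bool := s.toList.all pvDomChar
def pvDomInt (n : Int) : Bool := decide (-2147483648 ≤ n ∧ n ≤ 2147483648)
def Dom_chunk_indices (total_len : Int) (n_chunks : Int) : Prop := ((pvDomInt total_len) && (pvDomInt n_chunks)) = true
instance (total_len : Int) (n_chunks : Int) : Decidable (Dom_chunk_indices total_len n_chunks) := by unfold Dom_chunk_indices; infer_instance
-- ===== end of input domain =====

-- B replaces A's running-start accumulator loop with a stateless closed-form comprehension (simpler decomposition).

-- ===== PORT A =====
def chunk_indices (total_len : Int) (n_chunks : Int) : List (Int × Int) :=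
  let base := PySem.Int.floordiv total_len n_chunks
  let remainder := PySem.Int.mod total_len n_chunks
  let st := (PySem.List.pyRange 0 n_chunks 1).foldl
    (fun (s : List (Int × Int) × Int) i =>
      let e := s.2 + base + (if i < remainder then 1 else 0)
      (s.1 ++ [(s.2, e)], e)) ([], 0)
  st.1

-- ===== PORT B =====
def chunk_indices_alt (total_len : Int) (n_chunks : Int) : List (Int × Int) :=
  let base := PySem.Int.floordiv total_len n_chunks
  let remainder := PySem.Int.mod total_len n_chunks
  (PySem.List.pyRange 0 n_chunks 1).map
    (fun i => (i * base + min i remainder, (i + 1) * base + min (i + 1) remainder))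

-- ===== PRECONDITION & SPEC =====
-- Python raises ZeroDivisionError on '//' when n_chunks == 0; Pre_ excludes exactly that.
def Pre_chunk_indices (total_len : Int) (n_chunks : Int) : Prop := n_chunks ≠ 0
instance (total_len : Int) (n_chunks : Int) : Decidable (Pre_chunk_indices total_len n_chunks) := by unfold Pre_chunk_indices; infer_instance
def pvWitness_chunk_indices : Int × Int := (10, 3)

def Spec_chunk_indices (total_len : Int) (n_chunks : Int) (out : List (Int × Int)) : Prop := out = chunk_indices_alt total_len n_chunks
instance (total_len : Int) (n_chunks : Int) (out : List (Int × Int)) : Decidable (Spec_chunk_indices total_len n_chunks out) := by unfold Spec_chunk_indices; infer_instance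

-- ===== CLAIM =====
def Claim_equal_chunk_indices : Prop := ∀ (total_len : Int) (n_chunks : Int), Dom_chunk_indices total_len n_chunks → Pre_chunk_indices total_len n_chunks → Spec_chunk_indices total_len n_chunks (chunk_indices total_len n_chunks)

-- ===== LEMMAS AND PROOFS =====

-- The loop invariant: after processing range(0, m), the accumulator start equals
-- m*base + min m rem, and the collected list is the closed-form map.
lemma chunk_loop_eq (base rem : Int) (hrem : 0 ≤ rem) (m : Nat) :
    (PySem.List.pyRange 0 (m : Int) 1).foldl
      (fun (s : List (Int × Int) × Int) i =>
        let e := s.2 + base + (if i < rem then 1 else 0)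
        (s.1 ++ [(s.2, e)], e)) ([], 0)
    = ((PySem.List.pyRange 0 (m : Int) 1).map
        (fun i => (i * base + min i rem, (i + 1) * base + min (i + 1) rem)),
       (m : Int) * base + min (m : Int) rem) := by
  induction m with
  | zero =>
    simp [PySem.List.pyRange_one_eq_nil (by omega : (0:Int) ≤ 0)]
    omega
  | succ k ih =>
    have h : ((k + 1 : Nat) : Int) = (k : Int) + 1 := by push_cast; ring
    rw [h, PySem.List.pyRange_one_succ_right (by positivity : (0:Int) ≤ (k:Int))]
    rw [List.foldl_append, ih, List.map_append]
    simp only [List.foldl, List.map]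
    have h1 : (k:Int) * base + min (k:Int) rem + base + (if (k:Int) < rem then 1 else 0)
        = ((k:Int) + 1) * base + min ((k:Int) + 1) rem := by
      split_ifs with hk <;> · rw [show ((k:Int)+1)*base = (k:Int)*base + base by ring]; omega
    rw [h1]

-- ===== VERDICT =====
theorem chunk_indices_spec : Claim_equal_chunk_indices := by
  intro total_len n_chunks _ hpre
  unfold Spec_chunk_indices chunk_indices chunk_indices_alt
  by_cases hn : n_chunks ≤ 0
  · rw [PySem.List.pyRange_one_eq_nil hn]
    simp
  · have hn' : 0 < n_chunks := by omega
    have hrem : 0 ≤ PySem.Int.mod total_len n_chunks := by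
      rw [PySem.Int.mod_eq_emod_of_pos hn']
      exact Int.emod_nonneg _ (by omega)
    have hcast : n_chunks = ((n_chunks.toNat : Nat) : Int) := by omega
    rw [hcast]
    simpa using congrArg Prod.fst
      (chunk_loop_eq (PySem.Int.floordiv total_len ((n_chunks.toNat : Nat) : Int))
        (PySem.Int.mod total_len ((n_chunks.toNat : Nat) : Int)) (hcast ▸ hrem) n_chunks.toNat)
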